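-- pv_equiv track=rewrite | github.com/ODaynes/NaiveClassifier | naive.py | baggify_documents
-- ===== SOURCE A (Python) =====
-- def baggify_documents(documents): # combines all documents into one bag of words for each class
--     collected = {}
--
--     # collect class strings
--     for document in documents:
--         if document[1] in collected:
--             collected[document[1]] = collected[document[1]] + " " + document[2]
--         else:
--             collected[document[1]] = document[2]
--
--     # split class strings into individual tokens
--     for clazz, body in collected.items():
--         collected[clazz] = body.split()
--
--     return collected
-- ===== SOURCE B (Python) =====
-- def baggify_documents(documents):  # one pass: tokenize each document once and extend the per-class token list
--     bags = {}
--     for document in documents: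
--         bags.setdefault(document[1], []).extend(document[2].split())
--     return bags
-- ===== Notes on version B (the rewrite author's own statement) =====
-- stated objective: simpler
-- what changed: Single loop maintaining per-class token lists (dict setdefault/extend), tokenizing each document once, instead of accumulating one space-joined string per class and re-splitting every class string in a second pass.
import Mathlib
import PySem

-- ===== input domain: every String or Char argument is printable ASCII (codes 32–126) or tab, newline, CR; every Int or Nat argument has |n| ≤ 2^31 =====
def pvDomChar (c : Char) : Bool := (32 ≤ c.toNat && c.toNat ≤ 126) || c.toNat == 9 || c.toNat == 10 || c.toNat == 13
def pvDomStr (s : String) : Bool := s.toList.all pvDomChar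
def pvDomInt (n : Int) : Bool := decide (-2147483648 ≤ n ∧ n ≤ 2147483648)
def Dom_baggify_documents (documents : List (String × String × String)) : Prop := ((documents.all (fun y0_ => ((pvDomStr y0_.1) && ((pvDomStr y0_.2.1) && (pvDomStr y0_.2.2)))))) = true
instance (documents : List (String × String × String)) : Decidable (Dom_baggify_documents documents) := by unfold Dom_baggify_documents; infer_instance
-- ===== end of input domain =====

-- B replaces A's two passes (accumulate a space-joined string per class, then re-split every class
-- string) by one pass that tokenizes each document once and extends a per-class token list.

-- ===== PORT A =====
-- Python's second loop reassigns collected[clazz] (a str) to body.split() (a list) in place; under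
-- the type convention this in-place retyping is rendered as rebuilding the dict of split values by
-- the same iteration over items in insertion order (each key reassigned exactly once).
def baggify_documents (documents : List (String × String × String)) : List (String × List String) :=
  let collected : PySem.Dict String String :=
    documents.foldl (fun d document =>
      if d.contains document.2.1 then
        d.insert document.2.1 (d.getD document.2.1 "" ++ " " ++ document.2.2)
      else
        d.insert document.2.1 document.2.2) PySem.Dict.empty
  (collected.items.foldl (fun d p => d.insert p.1 (PySem.Str.split₀ p.2)) PySem.Dict.empty).items

-- ===== PORT B =====
-- bags.setdefault(document[1], []).extend(document[2].split())  =  modify with default []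
def baggify_documents_alt (documents : List (String × String × String)) : List (String × List String) :=
  (documents.foldl (fun bags document =>
    bags.modify document.2.1 [] (· ++ PySem.Str.split₀ document.2.2)) PySem.Dict.empty).items

-- ===== PRECONDITION & SPEC =====
def Spec_baggify_documents (documents : List (String × String × String)) (out : List (String × List String)) : Prop := out = baggify_documents_alt documents
instance (documents : List (String × String × String)) (out : List (String × List String)) : Decidable (Spec_baggify_documents documents out) := by unfold Spec_baggify_documents; infer_instance

-- ===== CLAIM (what is proved, stated in full; the proofs are below) =====
def Claim_equal_baggify_documents : Prop := ∀ (documents : List (String × String × String)), Dom_baggify_documents documents → Spec_baggify_documents documents (baggify_documents documents)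

-- ===== LEMMAS AND PROOFS =====

-- The accumulator of split₀.go is a (reversed) prefix of the result.
theorem split0_go_acc (s : List Char) : ∀ (cur : List Char) (acc : List (List Char)),
    PySem.Chars.split₀.go s cur acc = acc.reverse ++ PySem.Chars.split₀.go s cur [] := by
  induction s with
  | nil =>
      intro cur acc
      simp only [PySem.Chars.split₀.go]
      by_cases h : cur.isEmpty <;> simp [h]
  | cons c rest ih =>
      intro cur acc
      simp only [PySem.Chars.split₀.go]
      by_cases hs : PySem.Chars.isspace c
      · by_cases h : cur.isEmpty
        · simp only [hs, h, if_true]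
          rw [ih [] acc]
        · simp only [hs, h, if_true, Bool.false_eq_true, if_false]
          rw [ih [] (cur.reverse :: acc), ih [] [cur.reverse]]
          simp
      · simp only [hs, Bool.false_eq_true, if_false]
        rw [ih (c :: cur) acc]

-- Splitting distributes over a single interposed space.
theorem split0_go_append_space (b : List Char) : ∀ (a cur : List Char) (acc : List (List Char)),
    PySem.Chars.split₀.go (a ++ ' ' :: b) cur acc
      = PySem.Chars.split₀.go a cur acc ++ PySem.Chars.split₀.go b [] [] := by
  intro a
  induction a with
  | nil =>
      intro cur acc
      have hsp : PySem.Chars.isspace ' ' = true := by decide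
      simp only [List.nil_append, PySem.Chars.split₀.go, hsp, if_true]
      by_cases h : cur.isEmpty
      · simp only [h, if_true]
        rw [split0_go_acc b [] acc]
      · simp only [h, Bool.false_eq_true, if_false]
        rw [split0_go_acc b [] (cur.reverse :: acc)]
  | cons c rest ih =>
      intro cur acc
      simp only [List.cons_append, PySem.Chars.split₀.go]
      by_cases hs : PySem.Chars.isspace c
      · by_cases h : cur.isEmpty <;>
          simp only [hs, h, if_true, Bool.false_eq_true, if_false] <;> rw [ih]
      · simp only [hs, Bool.false_eq_true, if_false]
        rw [ih]

theorem split0_str_space (a b : String) :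
    PySem.Str.split₀ (a ++ " " ++ b) = PySem.Str.split₀ a ++ PySem.Str.split₀ b := by
  simp only [PySem.Str.split₀]
  have h : (a ++ " " ++ b).toList = a.toList ++ ' ' :: b.toList := by
    simp [String.toList_append]
  rw [h]
  simp only [PySem.Chars.split₀]
  rw [split0_go_append_space, List.map_append]

-- A's loop body in keyed-insert form (for the nodup-keys lemma).
theorem foldA_fun_eq :
    (fun (d : PySem.Dict String String) (document : String × String × String) =>
      if d.contains document.2.1 then
        d.insert document.2.1 (d.getD document.2.1 "" ++ " " ++ document.2.2)
      else
        d.insert document.2.1 document.2.2)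
    = (fun d document => d.insert document.2.1
        (if d.contains document.2.1 then d.getD document.2.1 "" ++ " " ++ document.2.2
         else document.2.2)) := by
  funext d document
  by_cases h : d.contains document.2.1 <;> simp [h]

-- Invariant: B's dict is A's dict with every value split.
theorem bag_invariant (documents : List (String × String × String)) :
    ∀ (dA : PySem.Dict String String) (dB : PySem.Dict String (List String)),
    dA.keys.Nodup →
    dB.items = dA.items.map (fun p => (p.1, PySem.Str.split₀ p.2)) →
    (documents.foldl (fun bags document =>
        bags.modify document.2.1 [] (· ++ PySem.Str.split₀ document.2.2)) dB).items
      = (documents.foldl (fun d document =>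
          if d.contains document.2.1 then
            d.insert document.2.1 (d.getD document.2.1 "" ++ " " ++ document.2.2)
          else
            d.insert document.2.1 document.2.2) dA).items.map
        (fun p => (p.1, PySem.Str.split₀ p.2)) := by
  induction documents with
  | nil => intro dA dB _ hmap; simpa using hmap
  | cons doc rest ih =>
      intro dA dB hnd hmap
      simp only [List.foldl_cons]
      have hkeys : dB.keys = dA.keys := by
        simp only [PySem.Dict.keys, hmap, List.map_map]
        rfl
      have hndB : dB.items.map Prod.fst |>.Nodup := by
        have : dB.keys.Nodup := hkeys ▸ hnd
        simpa [PySem.Dict.keys] using this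
      have hcont : dB.contains doc.2.1 = dA.contains doc.2.1 := by
        rw [PySem.Dict.contains_eq_decide_mem_keys, PySem.Dict.contains_eq_decide_mem_keys, hkeys]
      by_cases hA : dA.contains doc.2.1
      · -- class already present: A appends " " ++ body, B extends with the tokens
        rw [if_pos hA]
        apply ih
        · exact PySem.Dict.nodup_keys_insert _ _ _ hnd
        · show (dB.insert doc.2.1 (dB.getD doc.2.1 [] ++ PySem.Str.split₀ doc.2.2)).items = _
          rw [PySem.Dict.items_insert_of_contains _ _ (hcont.trans (by simp [hA])),
              PySem.Dict.items_insert_of_contains _ _ hA, hmap, List.map_map, List.map_map]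
          apply List.map_congr_left
          intro p hp
          by_cases hpk : p.1 = doc.2.1
          · have hgA : dA.getD doc.2.1 "" = p.2 := by
              have : (doc.2.1, p.2) ∈ dA.items := by rw [← hpk]; exact hp
              exact PySem.Dict.getD_of_mem_items dA this hnd ""
            have hgB : dB.getD doc.2.1 [] = PySem.Str.split₀ p.2 := by
              have hmem : (doc.2.1, PySem.Str.split₀ p.2) ∈ dB.items := by
                rw [hmap, ← hpk]
                exact List.mem_map_of_mem hp
              exact PySem.Dict.getD_of_mem_items dB hmem (hkeys ▸ hnd) []
            simp [Function.comp, hpk, hgA, hgB, split0_str_space]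
          · simp [Function.comp, hpk]
      · -- new class: both append a fresh entry
        rw [if_neg hA]
        apply ih
        · exact PySem.Dict.nodup_keys_insert _ _ _ hnd
        · show (dB.insert doc.2.1 (dB.getD doc.2.1 [] ++ PySem.Str.split₀ doc.2.2)).items = _
          have hBc : dB.contains doc.2.1 = false := by
            rw [hcont]; exact eq_false_of_ne_true hA
          have hgB : dB.getD doc.2.1 [] = [] :=
            PySem.Dict.getD_of_not_contains _ _ hBc
          rw [PySem.Dict.items_insert_of_not_contains _ _ hBc,
              PySem.Dict.items_insert_of_not_contains _ _ (eq_false_of_ne_true hA),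
              hmap, hgB, List.map_append]
          simp

-- ===== VERDICT (by name: the statement is the Claim_ definition above) =====
theorem baggify_documents_spec : Claim_equal_baggify_documents := by
  intro documents _
  unfold Spec_baggify_documents baggify_documents baggify_documents_alt
  have hnodA : (documents.foldl (fun d document =>
      if d.contains document.2.1 then
        d.insert document.2.1 (d.getD document.2.1 "" ++ " " ++ document.2.2)
      else
        d.insert document.2.1 document.2.2) PySem.Dict.empty).keys.Nodup := by
    rw [foldA_fun_eq]
    exact PySem.Dict.nodup_keys_foldl_insert_key documents (fun document => document.2.1) _ _
      PySem.Dict.nodup_keys_empty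
  rw [PySem.Dict.items_foldl_insert_fresh _ Prod.fst (fun p => PySem.Str.split₀ p.2) _
      (fun a _ => PySem.Dict.contains_empty a.1) (by simpa [PySem.Dict.keys] using hnodA)]
  rw [bag_invariant documents PySem.Dict.empty PySem.Dict.empty PySem.Dict.nodup_keys_empty (by rfl)]
  rfl
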